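-- pv_equiv track=rewrite | github.com/naqushab/ScalerAcademy | Scaler/Advanced/Bit Manipulation - II/HW3.py | solve
-- ===== SOURCE A (Python) =====
-- def solve(A, B):
--     l = len(bin(A)) - 2
--     ans = 0
--     for i in range(l, -1, -1):
--         mask = 1 << i
--         if A & mask and B > 0:
--             ans = ans | mask
--             B -= 1
--         if B == 0:
--             return ans
--     for i in range(l):
--         mask = 1 << i
--         if A & mask == 0 and B > 0:
--             ans = ans | mask
--             B -= 1
--         if B == 0:
--             return ans
--     while B > 0:
--         ans = ans << 1
--         ans = ans | 1
--         B -= 1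
--     return ans
-- ===== SOURCE B (Python) =====
-- def solve(A, B):
--     if B <= 0:
--         return 0
--     s = bin(A).count('1')
--     if B <= s:
--         for _ in range(s - B):
--             A &= A - 1
--         return A
--     ans = A
--     rem = B - s
--     bit = 0
--     while rem > 0:
--         if (ans >> bit) & 1 == 0:
--             ans |= 1 << bit
--             rem -= 1
--         bit += 1
--     return ans
-- ===== Notes on version B (the rewrite author's own statement) =====
-- stated objective: alternative
-- what changed: Replaces A's three sequential scans (high-to-low keep, low-to-high fill, append-ones tail) by a popcount split: a non-positive budget returns 0 at once, B <= popcount(A) clears the lowest popcount(A)-B set bits with the A&=A-1 trick, and otherwise the lowest zero bits are filled upward in one unbounded loop.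
-- outside the precondition, e.g. on solve(-5, 2): A returns 24, B returns -5
import Mathlib
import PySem

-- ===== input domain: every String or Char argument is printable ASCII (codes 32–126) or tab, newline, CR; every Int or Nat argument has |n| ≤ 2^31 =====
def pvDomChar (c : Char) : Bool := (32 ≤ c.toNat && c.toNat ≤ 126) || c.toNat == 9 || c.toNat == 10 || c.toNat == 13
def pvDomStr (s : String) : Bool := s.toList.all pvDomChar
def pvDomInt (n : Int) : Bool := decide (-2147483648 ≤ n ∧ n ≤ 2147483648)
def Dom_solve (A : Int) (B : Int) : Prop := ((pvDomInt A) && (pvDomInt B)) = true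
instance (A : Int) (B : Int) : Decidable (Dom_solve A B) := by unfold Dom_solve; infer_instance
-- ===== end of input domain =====

-- B replaces A's three sequential scans by a popcount split: clear the lowest
-- popcount(A)-B set bits with a &= a-1 when B <= popcount(A), else fill the lowest
-- zero bits upward in one loop (objective: alternative algorithm, similar cost).

-- ===== PORT A =====

-- l = len(bin(A)) - 2: bin(A) is [sign] ++ "0b" ++ binary digits of |A| ("0" for 0),
-- so len(bin(A)) - 2 = bitLength |A| (which is 1 for A = 0) plus 1 if A < 0; exact for every int.
def solveBinLen (A : Int) : Int :=
  (if A = 0 then 1 else (PySem.Int.bitLength A : Int)) + (if A < 0 then 1 else 0)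

-- for i in range(l, -1, -1): body with two early-return checks; i counts down from l to 0.
def solveLoop1 (A : Int) : Nat → Int → Int → Option Int × Int × Int
  | 0, ans, B =>
    let mask : Int := (1 : Int) <<< (0 : Nat)
    let p : Int × Int := if PySem.Int.band A mask ≠ 0 ∧ 0 < B then (PySem.Int.bor ans mask, B - 1) else (ans, B)
    if p.2 = 0 then (some p.1, p.1, p.2) else (none, p.1, p.2)
  | i + 1, ans, B =>
    let mask : Int := (1 : Int) <<< (i + 1)
    let p : Int × Int := if PySem.Int.band A mask ≠ 0 ∧ 0 < B then (PySem.Int.bor ans mask, B - 1) else (ans, B)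
    if p.2 = 0 then (some p.1, p.1, p.2) else solveLoop1 A i p.1 p.2

-- for i in range(l): same body shape, i counts up from 0 while i < l.
def solveLoop2 (A : Int) (l : Nat) (i : Nat) (ans B : Int) : Option Int × Int × Int :=
  if h : i < l then
    let mask : Int := (1 : Int) <<< i
    let p : Int × Int := if PySem.Int.band A mask = 0 ∧ 0 < B then (PySem.Int.bor ans mask, B - 1) else (ans, B)
    if p.2 = 0 then (some p.1, p.1, p.2) else solveLoop2 A l (i + 1) p.1 p.2
  else (none, ans, B)
termination_by l - i

-- while B > 0: ans = ans << 1; ans = ans | 1; B -= 1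
def solveLoop3 (ans B : Int) : Int :=
  if 0 < B then solveLoop3 (PySem.Int.bor (ans <<< (1 : Nat)) 1) (B - 1) else ans
termination_by B.toNat
decreasing_by omega

def solve (A : Int) (B : Int) : Int :=
  let l := solveBinLen A
  match solveLoop1 A l.toNat 0 B with
  | (some r, _, _) => r
  | (none, ans1, B1) =>
    match solveLoop2 A l.toNat 0 ans1 B1 with
    | (some r, _, _) => r
    | (none, ans2, B2) => solveLoop3 ans2 B2

-- ===== PORT B =====

-- for _ in range(s - B): A &= A - 1
def solveAltClear (a : Int) : Nat → Int
  | 0 => a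
  | k + 1 => solveAltClear (PySem.Int.band a (a - 1)) k

-- while rem > 0: if (ans >> bit) & 1 == 0: ans |= 1 << bit; rem -= 1; bit += 1
-- The Python while-loop is unbounded; for A ≥ 0 it performs at most (B-s) + bitLength A + 1
-- iterations, which is passed as structural fuel (never exhausted on inputs satisfying Pre_).
def solveAltFill (ans rem : Int) (bit : Nat) : Nat → Int
  | 0 => ans
  | fuel + 1 =>
    if 0 < rem then
      if PySem.Int.band (ans >>> bit) 1 = 0 then
        solveAltFill (PySem.Int.bor ans ((1 : Int) <<< bit)) (rem - 1) (bit + 1) fuel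
      else solveAltFill ans rem (bit + 1) fuel
    else ans

def solve_alt (A : Int) (B : Int) : Int :=
  if B ≤ 0 then 0
  else
    let s : Nat := PySem.Int.bitCount A      -- s = bin(A).count('1')
    if B ≤ (s : Int) then solveAltClear A ((s : Int) - B).toNat
    else solveAltFill A (B - (s : Int)) 0 ((B - (s : Int)).toNat + PySem.Int.bitLength A + 1)

-- ===== PRECONDITION & SPEC =====
-- Pre_ excludes negative A with a positive budget B, where A's result depends on the sign
-- character of bin() and two's-complement masking — an artefact outside the natural domain
-- (non-negative ints) of this greedy bit problem; B's fill loop does not terminate on some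
-- of those inputs. (For B ≤ 0 both programs return 0 even for negative A, so that stays in.)
def Pre_solve (A : Int) (B : Int) : Prop := 0 ≤ A ∨ B ≤ 0
instance (A : Int) (B : Int) : Decidable (Pre_solve A B) := by unfold Pre_solve; infer_instance
def pvWitness_solve : Int × Int := (5, 2)

def Spec_solve (A : Int) (B : Int) (out : Int) : Prop := out = solve_alt A B
instance (A : Int) (B : Int) (out : Int) : Decidable (Spec_solve A B out) := by unfold Spec_solve; infer_instance

-- ===== CLAIM (what is proved, stated in full; the proofs are below) =====
def Claim_equal_solve : Prop := ∀ (A : Int) (B : Int), Dom_solve A B → Pre_solve A B → Spec_solve A B (solve A B)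

-- ===== LEMMAS AND PROOFS =====

-- popcount on Nat
def pc : Nat → Nat
  | 0 => 0
  | n + 1 => ((n + 1) % 2) + pc ((n + 1) / 2)
decreasing_by exact Nat.div_lt_self (Nat.succ_pos n) (by norm_num)

-- clear the lowest set bit, k times
def clr (a : Nat) : Nat → Nat
  | 0 => a
  | k + 1 => clr (a &&& (a - 1)) k

-- Nat mirror of solveLoop1
def nl1 (a : Nat) : Nat → Nat → Int → Option Nat × Nat × Int
  | 0, ans, b =>
    let mask := 2 ^ 0
    let p : Nat × Int := if a &&& mask ≠ 0 ∧ 0 < b then (ans ||| mask, b - 1) else (ans, b)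
    if p.2 = 0 then (some p.1, p.1, p.2) else (none, p.1, p.2)
  | i + 1, ans, b =>
    let mask := 2 ^ (i + 1)
    let p : Nat × Int := if a &&& mask ≠ 0 ∧ 0 < b then (ans ||| mask, b - 1) else (ans, b)
    if p.2 = 0 then (some p.1, p.1, p.2) else nl1 a i p.1 p.2

-- Nat mirror of solveLoop2
def nl2 (a l : Nat) (i : Nat) (ans : Nat) (b : Int) : Option Nat × Nat × Int :=
  if h : i < l then
    let mask := 2 ^ i
    let p : Nat × Int := if a &&& mask = 0 ∧ 0 < b then (ans ||| mask, b - 1) else (ans, b)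
    if p.2 = 0 then (some p.1, p.1, p.2) else nl2 a l (i + 1) p.1 p.2
  else (none, ans, b)
termination_by l - i

-- Nat mirror of solveLoop3
def nl3 (ans : Nat) (b : Int) : Nat :=
  if 0 < b then nl3 (2 * ans + 1) (b - 1) else ans
termination_by b.toNat
decreasing_by omega

-- Nat mirror of solveAltFill
def nf (ans : Nat) (rem : Int) (bit : Nat) : Nat → Nat
  | 0 => ans
  | fuel + 1 =>
    if 0 < rem then
      if (ans >>> bit) &&& 1 = 0 then nf (ans ||| 2 ^ bit) (rem - 1) (bit + 1) fuel
      else nf ans rem (bit + 1) fuel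
    else ans

theorem pc_eq (n : Nat) (h : 0 < n) : pc n = n % 2 + pc (n / 2) := by
  cases n with
  | zero => omega
  | succ n => simp [pc]

theorem pc_two_mul (m : Nat) : pc (2 * m) = pc m := by
  rcases Nat.eq_zero_or_pos m with h | h
  · subst h; simp [pc]
  · have h1 : 2 * m % 2 = 0 := by omega
    have h2 : 2 * m / 2 = m := by omega
    rw [pc_eq _ (by omega), h1, h2]; omega
theorem pc_odd (m : Nat) : pc (2 * m + 1) = pc m + 1 := by
  have h1 : (2 * m + 1) % 2 = 1 := by omega
  have h2 : (2 * m + 1) / 2 = m := by omega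
  rw [pc_eq _ (by omega), h1, h2]; omega

theorem testBit_aligned (i m r j : Nat) (hr : r < 2 ^ i) :
    (m * 2 ^ i + r).testBit j = if j < i then r.testBit j else m.testBit (j - i) := by
  by_cases h : j < i
  · have hm : (m * 2 ^ i + r) % 2 ^ i = r := by
      rw [Nat.add_mod, Nat.mul_mod_left, Nat.mod_eq_of_lt hr]
      simp [Nat.mod_eq_of_lt hr]
    have ht := Nat.testBit_mod_two_pow (m * 2 ^ i + r) i j
    rw [hm] at ht
    simp [h] at ht
    simp [h, ht]
  · have hd : (m * 2 ^ i + r) / 2 ^ i = m := by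
      rw [Nat.mul_comm, Nat.mul_add_div (Nat.two_pow_pos i),
        Nat.div_eq_of_lt hr]
      omega
    have ht := Nat.testBit_div_two_pow (n := i) (m * 2 ^ i + r) (j - i)
    rw [hd] at ht
    have hj : j - i + i = j := by omega
    rw [hj] at ht
    simp [h, ht]

theorem landAligned (i m m' r r' : Nat) (hr : r < 2 ^ i) (hr' : r' < 2 ^ i) :
    (m * 2 ^ i + r) &&& (m' * 2 ^ i + r') = (m &&& m') * 2 ^ i + (r &&& r') := by
  have hrr : r &&& r' < 2 ^ i := Nat.lt_of_le_of_lt Nat.and_le_left hr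
  apply Nat.eq_of_testBit_eq
  intro j
  rw [Nat.testBit_land, testBit_aligned i m r j hr, testBit_aligned i m' r' j hr',
    testBit_aligned i (m &&& m') (r &&& r') j hrr]
  by_cases h : j < i <;> simp [h, Nat.testBit_land]

theorem lorAligned (i m m' r r' : Nat) (hr : r < 2 ^ i) (hr' : r' < 2 ^ i) :
    (m * 2 ^ i + r) ||| (m' * 2 ^ i + r') = (m ||| m') * 2 ^ i + (r ||| r') := by
  have hrr : r ||| r' < 2 ^ i := Nat.or_lt_two_pow hr hr'
  apply Nat.eq_of_testBit_eq
  intro j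
  rw [Nat.testBit_lor, testBit_aligned i m r j hr, testBit_aligned i m' r' j hr',
    testBit_aligned i (m ||| m') (r ||| r') j hrr]
  by_cases h : j < i <;> simp [h, Nat.testBit_lor]

theorem lor_odd (m : Nat) : 2 * m ||| 1 = 2 * m + 1 := by
  have h := lorAligned 1 m 0 0 1 (by norm_num) (by norm_num)
  norm_num at h
  rw [Nat.mul_comm] at h
  simpa using h

theorem lor_two_pow_of_dvd (i : Nat) {x : Nat} (h : 2 ^ (i + 1) ∣ x) :
    x ||| 2 ^ i = x + 2 ^ i := by
  obtain ⟨c, rfl⟩ := h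
  have key := lorAligned i (2 * c) 1 0 0 (Nat.two_pow_pos i) (Nat.two_pow_pos i)
  simp [lor_odd] at key
  rw [show 2 ^ (i + 1) * c = 2 * c * 2 ^ i from by ring, key]; ring

theorem and_pow (a i : Nat) : a &&& 2 ^ i = (a / 2 ^ i % 2) * 2 ^ i := by
  rw [Nat.and_two_pow]
  have h2 : a.testBit i = decide (a / 2 ^ i % 2 = 1) := by
    have := Nat.testBit_div_two_pow (n := i) a 0
    rw [Nat.testBit_zero] at this
    simpa using this.symm
  rcases Nat.mod_two_eq_zero_or_one (a / 2 ^ i) with h | h <;> simp [h2, h]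

theorem land_pred_odd (m : Nat) : (2 * m + 1) &&& (2 * m) = 2 * m := by
  have h := landAligned 1 m m 1 0 (by norm_num) (by norm_num)
  norm_num [Nat.and_self] at h
  rw [Nat.mul_comm m 2] at h
  simpa using h

theorem land_pred_even (m : Nat) (h : 0 < m) :
    (2 * m) &&& (2 * m - 1) = 2 * (m &&& (m - 1)) := by
  rw [show 2 * m - 1 = (m - 1) * 2 ^ 1 + 1 from by omega,
    show 2 * m = m * 2 ^ 1 + 0 from by ring,
    landAligned 1 m (m - 1) 0 1 (by norm_num) (by norm_num)]
  simp [Nat.zero_and]; ring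

theorem and_pred_lt (a : Nat) (h : 0 < a) : a &&& (a - 1) < a := by
  induction a using Nat.strong_induction_on with
  | _ a ih =>
    obtain ⟨m, rfl | rfl⟩ : ∃ m, a = 2 * m ∨ a = 2 * m + 1 := ⟨a / 2, by omega⟩
    · have hm : 0 < m := by omega
      rw [land_pred_even m hm]
      have := ih m (by omega) hm
      omega
    · rw [show 2 * m + 1 - 1 = 2 * m from by omega, land_pred_odd]
      omega

theorem pc_and_pred (a : Nat) (h : 0 < a) : pc (a &&& (a - 1)) + 1 = pc a := by
  induction a using Nat.strong_induction_on with
  | _ a ih =>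
    obtain ⟨m, rfl | rfl⟩ : ∃ m, a = 2 * m ∨ a = 2 * m + 1 := ⟨a / 2, by omega⟩
    · have hm : 0 < m := by omega
      rw [land_pred_even m hm, pc_two_mul, pc_two_mul, ih m (by omega) hm]
    · rw [show 2 * m + 1 - 1 = 2 * m from by omega, land_pred_odd, pc_two_mul, pc_odd]

theorem clr_zero_left (k : Nat) : clr 0 k = 0 := by
  induction k with
  | zero => simp [clr]
  | succ k ih => simpa [clr] using ih

theorem clr_of_pc_le (a : Nat) : ∀ k, pc a ≤ k → clr a k = 0 := by
  induction a using Nat.strong_induction_on with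
  | _ a ih =>
    intro k hk
    rcases Nat.eq_zero_or_pos a with rfl | ha
    · exact clr_zero_left k
    · have hpc := pc_and_pred a ha
      cases k with
      | zero => omega
      | succ k =>
        show clr (a &&& (a - 1)) k = 0
        exact ih _ (and_pred_lt a ha) k (by omega)

theorem clr_aligned (i m : Nat) : ∀ k r, r < 2 ^ i → k ≤ pc r →
    clr (m * 2 ^ i + r) k = m * 2 ^ i + clr r k := by
  intro k
  induction k with
  | zero => intro r _ _; simp [clr]
  | succ k ih =>
    intro r hr hk
    have hr0 : 0 < r := by
      by_contra h
      have : r = 0 := by omega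
      subst this
      simp [pc] at hk
    have hstep : (m * 2 ^ i + r) &&& (m * 2 ^ i + r - 1) = m * 2 ^ i + (r &&& (r - 1)) := by
      rw [show m * 2 ^ i + r - 1 = m * 2 ^ i + (r - 1) from by omega,
        landAligned i m m r (r - 1) hr (by omega), Nat.and_self]
    show clr ((m * 2 ^ i + r) &&& (m * 2 ^ i + r - 1)) k = m * 2 ^ i + clr (r &&& (r - 1)) k
    rw [hstep]
    exact ih (r &&& (r - 1)) (Nat.lt_of_le_of_lt Nat.and_le_left hr)
      (by have := pc_and_pred r hr0; omega)

theorem mod_pow_succ_split (a i : Nat) :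
    a % 2 ^ (i + 1) = (a / 2 ^ i % 2) * 2 ^ i + a % 2 ^ i := by
  rw [pow_succ, Nat.mod_mul]; ring

theorem pc_eq' (r : Nat) : pc r = r % 2 + pc (r / 2) := by
  rcases Nat.eq_zero_or_pos r with rfl | h
  · simp [pc]
  · exact pc_eq r h

theorem pc_one : pc 1 = 1 := by
  rw [pc_eq 1 one_pos]
  show 1 % 2 + pc 0 = 1
  simp [pc]

theorem pc_add_pow : ∀ (i r : Nat), r < 2 ^ i → pc (2 ^ i + r) = pc r + 1 := by
  intro i
  induction i with
  | zero =>
    intro r hr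
    interval_cases r
    have h0 : pc 0 = 0 := by simp [pc]
    norm_num [h0, pc_one]
  | succ i ih =>
    intro r hr
    have hn : 0 < 2 ^ (i + 1) + r := by positivity
    have h2 : (2 ^ (i + 1) + r) % 2 = r % 2 := by
      have : 2 ^ (i + 1) % 2 = 0 := by
        simp [pow_succ, Nat.mul_mod]
      omega
    have h3 : (2 ^ (i + 1) + r) / 2 = 2 ^ i + r / 2 := by
      have : 2 ^ (i + 1) = 2 ^ i * 2 := by rw [pow_succ]
      omega
    rw [pc_eq _ hn, h2, h3, ih (r / 2) (by
      have : 2 ^ (i + 1) = 2 ^ i * 2 := by rw [pow_succ]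
      omega), pc_eq' r]
    omega

-- main characterisation of loop 1
theorem nl1_spec (a : Nat) : ∀ (i : Nat) (ans : Nat) (b : Int), 0 < b → 2 ^ (i + 1) ∣ ans →
    nl1 a i ans b =
      (if b ≤ (pc (a % 2 ^ (i + 1)) : Int)
       then (some (ans + clr (a % 2 ^ (i + 1)) (pc (a % 2 ^ (i + 1)) - b.toNat)),
             ans + clr (a % 2 ^ (i + 1)) (pc (a % 2 ^ (i + 1)) - b.toNat), 0)
       else (none, ans + a % 2 ^ (i + 1), b - (pc (a % 2 ^ (i + 1)) : Int))) := by
  intro i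
  induction i with
  | zero =>
    intro ans b hb hd
    have hand : a &&& 2 ^ 0 = a % 2 := by simpa using and_pow a 0
    have hmod : a % 2 ^ (0 + 1) = a % 2 := by norm_num
    rcases Nat.mod_two_eq_zero_or_one a with h2 | h2
    · have hc : ¬ (a &&& 2 ^ 0 ≠ 0 ∧ 0 < b) := by simp [hand, h2]
      simp only [nl1]
      rw [if_neg hc]
      dsimp only
      rw [if_neg (show ¬ b = 0 from by omega),
        if_neg (show ¬ b ≤ ((pc (a % 2 ^ (0 + 1))) : Int) from by
          rw [hmod, h2]; simp [pc]; omega),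
        hmod, h2]
      simp [pc]
    · have hc : (a &&& 2 ^ 0 ≠ 0 ∧ 0 < b) := by
        refine ⟨?_, hb⟩; rw [hand, h2]; omega
      have hor : ans ||| 2 ^ 0 = ans + 1 := by
        simpa using lor_two_pow_of_dvd 0 (by simpa using hd)
      have hpc : pc (a % 2 ^ (0 + 1)) = 1 := by rw [hmod, h2, pc_one]
      simp only [nl1]
      rw [if_pos hc]
      dsimp only
      by_cases hb1 : b = 1
      · subst hb1
        rw [if_pos (show (1 : Int) - 1 = 0 from by norm_num),
          if_pos (show (1 : Int) ≤ ((pc (a % 2 ^ (0 + 1))) : Int) from by rw [hpc]; norm_num),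
          hpc, hmod, h2, hor]
        norm_num [clr]
      · rw [if_neg (show ¬ b - 1 = 0 from by omega),
          if_neg (show ¬ b ≤ ((pc (a % 2 ^ (0 + 1))) : Int) from by rw [hpc]; omega),
          hpc, hmod, h2, hor]
        norm_num
  | succ i ih =>
    intro ans b hb hd
    set t := a / 2 ^ (i + 1) % 2 with ht
    have hsplit : a % 2 ^ (i + 1 + 1) = t * 2 ^ (i + 1) + a % 2 ^ (i + 1) :=
      mod_pow_succ_split a (i + 1)
    have hand : a &&& 2 ^ (i + 1) = t * 2 ^ (i + 1) := and_pow a (i + 1)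
    have hlow : a % 2 ^ (i + 1) < 2 ^ (i + 1) := Nat.mod_lt _ (Nat.two_pow_pos _)
    have hdvd1 : 2 ^ (i + 1) ∣ ans := dvd_trans (pow_dvd_pow 2 (by omega)) hd
    rcases Nat.mod_two_eq_zero_or_one (a / 2 ^ (i + 1)) with h2 | h2
    · -- bit i+1 of a is clear: no-op step, recurse
      have ht0 : t = 0 := h2
      have hmod : a % 2 ^ (i + 1 + 1) = a % 2 ^ (i + 1) := by
        rw [hsplit, ht0]; simp
      have hc : ¬ (a &&& 2 ^ (i + 1) ≠ 0 ∧ 0 < b) := by simp [hand, ht0]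
      simp only [nl1]
      rw [if_neg hc]
      dsimp only
      rw [if_neg (show ¬ b = 0 from by omega), ih ans b hb hdvd1, hmod]
    · -- bit i+1 of a is set
      have ht1 : t = 1 := h2
      have hc : (a &&& 2 ^ (i + 1) ≠ 0 ∧ 0 < b) := by
        refine ⟨?_, hb⟩; rw [hand, ht1]; have := Nat.two_pow_pos (i + 1); omega
      have hor : ans ||| 2 ^ (i + 1) = ans + 2 ^ (i + 1) := lor_two_pow_of_dvd (i + 1) hd
      have hlowrw : a % 2 ^ (i + 1 + 1) = 2 ^ (i + 1) + a % 2 ^ (i + 1) := by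
        rw [hsplit, ht1]; ring
      have hpc : pc (a % 2 ^ (i + 1 + 1)) = pc (a % 2 ^ (i + 1)) + 1 := by
        rw [hlowrw, pc_add_pow (i + 1) _ hlow]
      have hclr : ∀ k, k ≤ pc (a % 2 ^ (i + 1)) →
          clr (a % 2 ^ (i + 1 + 1)) k = 2 ^ (i + 1) + clr (a % 2 ^ (i + 1)) k := by
        intro k hk
        rw [hlowrw]
        simpa using clr_aligned (i + 1) 1 k (a % 2 ^ (i + 1)) hlow hk
      simp only [nl1]
      rw [if_pos hc]
      dsimp only
      by_cases hb1 : b = 1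
      · subst hb1
        rw [if_pos (show (1 : Int) - 1 = 0 from by norm_num),
          if_pos (show (1 : Int) ≤ ((pc (a % 2 ^ (i + 1 + 1))) : Int) from by
            rw [hpc]; push_cast; omega)]
        rw [show pc (a % 2 ^ (i + 1 + 1)) - (1 : Int).toNat = pc (a % 2 ^ (i + 1)) from by
          rw [hpc]; omega]
        rw [hclr _ le_rfl, clr_of_pc_le _ _ le_rfl, hor]
        norm_num
      · have hb2 : 2 ≤ b := by omega
        rw [if_neg (show ¬ b - 1 = 0 from by omega),
          ih (ans ||| 2 ^ (i + 1)) (b - 1) (by omega) (by rw [hor]; exact Dvd.dvd.add hdvd1 dvd_rfl)]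
        by_cases hle : b - 1 ≤ ((pc (a % 2 ^ (i + 1))) : Int)
        · rw [if_pos hle, if_pos (show b ≤ ((pc (a % 2 ^ (i + 1 + 1))) : Int) from by
            rw [hpc]; push_cast at hle ⊢; omega)]
          rw [show pc (a % 2 ^ (i + 1)) - (b - 1).toNat =
              pc (a % 2 ^ (i + 1 + 1)) - b.toNat from by rw [hpc]; omega]
          rw [hclr _ (by rw [hpc]; omega), hor]
          simp only [Prod.mk.injEq, Option.some.injEq]
          push_cast
          exact ⟨by omega, by omega, trivial⟩
        · rw [if_neg hle, if_neg (show ¬ b ≤ ((pc (a % 2 ^ (i + 1 + 1))) : Int) from by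
            rw [hpc]; push_cast at hle ⊢; omega)]
          rw [hor, hpc, hlowrw]
          simp only [Prod.mk.injEq]
          push_cast
          exact ⟨trivial, by omega, by omega⟩

theorem nl1_nonpos (a : Nat) : ∀ (i ans : Nat) (b : Int), b < 0 →
    nl1 a i ans b = (none, ans, b) := by
  intro i
  induction i with
  | zero =>
    intro ans b hb
    simp [nl1, hb.ne, show ¬(0:Int) < b from by omega]
  | succ i ih =>
    intro ans b hb
    simp [nl1, hb.ne, show ¬(0:Int) < b from by omega]
    exact ih ans b hb

theorem nl3_pow_aux : ∀ (K : Nat) (b : Int) (n : Nat), b.toNat = K →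
    nl3 (2 ^ n - 1) b = 2 ^ (n + b.toNat) - 1 := by
  intro K
  induction K with
  | zero =>
    intro b n hK
    rw [nl3]
    simp [show ¬(0:Int) < b from by omega, hK]
  | succ K ih =>
    intro b n hK
    have hb : 0 < b := by omega
    rw [nl3]
    simp only [hb, if_pos]
    have h1 : 2 * (2 ^ n - 1) + 1 = 2 ^ (n + 1) - 1 := by
      have := Nat.two_pow_pos n
      have : 2 ^ (n + 1) = 2 * 2 ^ n := by rw [pow_succ]; ring
      omega
    rw [h1, ih (b - 1) (n + 1) (by omega),
      show n + 1 + (b - 1).toNat = n + b.toNat from by omega]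

theorem nl3_pow (b : Int) (n : Nat) : nl3 (2 ^ n - 1) b = 2 ^ (n + b.toNat) - 1 :=
  nl3_pow_aux _ b n rfl

theorem nf_nonpos (ans : Nat) (rem : Int) (bit : Nat) (fuel : Nat) (h : ¬ 0 < rem) :
    nf ans rem bit fuel = ans := by
  cases fuel <;> simp [nf, h]

theorem pred_pow_lor (n : Nat) : (2 ^ n - 1) ||| 2 ^ n = 2 ^ (n + 1) - 1 := by
  have h := lorAligned n 0 1 (2 ^ n - 1) 0
    (by have := Nat.two_pow_pos n; omega) (Nat.two_pow_pos n)
  simp at h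
  rw [h, pow_succ]
  have := Nat.two_pow_pos n
  omega

theorem nf_tail : ∀ (fuel : Nat) (b : Int) (n : Nat), b.toNat ≤ fuel →
    nf (2 ^ n - 1) b n fuel = 2 ^ (n + b.toNat) - 1 := by
  intro fuel
  induction fuel with
  | zero =>
    intro b n h
    simp [nf, show n + b.toNat = n from by omega]
  | succ fuel ih =>
    intro b n h
    by_cases hb : 0 < b
    · have htest : ((2 ^ n - 1) >>> n) &&& 1 = 0 := by
        rw [Nat.shiftRight_eq_div_pow, Nat.div_eq_of_lt (by have := Nat.two_pow_pos n; omega)]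
        simp
      simp only [nf, hb, if_pos, htest]
      rw [pred_pow_lor, ih (b - 1) (n + 1) (by omega),
        show n + 1 + (b - 1).toNat = n + b.toNat from by omega]
    · simp [nf, hb, show n + b.toNat = n from by omega]

-- joint simulation of loop2-then-loop3 against the fill loop
theorem sim2 (a l : Nat) (ha : a < 2 ^ l) : ∀ (k i : Nat) (b : Int) (fuel : Nat),
    i + k = l → 0 < b → (l - i) + b.toNat ≤ fuel →
    (match nl2 a l i ((a / 2 ^ i) * 2 ^ i + (2 ^ i - 1)) b with
     | (some v, _, _) => v
     | (none, ans2, b2) => nl3 ans2 b2)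
    = nf ((a / 2 ^ i) * 2 ^ i + (2 ^ i - 1)) b i fuel := by
  intro k
  induction k with
  | zero =>
    intro i b fuel hk hb hf
    obtain rfl : i = l := by omega
    have h0 : a / 2 ^ i = 0 := Nat.div_eq_of_lt ha
    rw [nl2, dif_neg (lt_irrefl i)]
    dsimp only
    simp only [h0, Nat.zero_mul, Nat.zero_add]
    rw [nl3_pow b i, nf_tail fuel b i (by omega)]
  | succ k ih =>
    intro i b fuel hk hb hf
    have hil : i < l := by omega
    obtain ⟨fuel', rfl⟩ : ∃ f', fuel = f' + 1 := ⟨fuel - 1, by omega⟩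
    set q := a / 2 ^ i with hqdef
    have h1 : (0 : Nat) < 2 ^ i := Nat.two_pow_pos i
    have hand : a &&& 2 ^ i = (q % 2) * 2 ^ i := and_pow a i
    have hdiv : (q * 2 ^ i + (2 ^ i - 1)) / 2 ^ i = q := by
      rw [Nat.mul_comm, Nat.mul_add_div h1, Nat.div_eq_of_lt (by omega)]
      omega
    have htest : ((q * 2 ^ i + (2 ^ i - 1)) >>> i) &&& 1 = q % 2 := by
      rw [Nat.shiftRight_eq_div_pow, hdiv, Nat.and_one_is_mod]
    have hm : a / 2 ^ (i + 1) = q / 2 := by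
      rw [hqdef, Nat.div_div_eq_div_mul, ← pow_succ]
    have hp : q * 2 ^ i = (q / 2) * 2 ^ (i + 1) + (q % 2) * 2 ^ i := by
      conv_lhs => rw [show q = 2 * (q / 2) + q % 2 from by omega]
      rw [pow_succ]; ring
    rcases Nat.mod_two_eq_zero_or_one q with hq2 | hq2
    · -- a's bit i is 0: both sides fill it
      rw [hq2] at hp
      simp only [Nat.zero_mul, Nat.add_zero] at hp
      have hor : (q * 2 ^ i + (2 ^ i - 1)) ||| 2 ^ i = q * 2 ^ i + (2 ^ i - 1) + 2 ^ i := by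
        have h3 := lorAligned i q 1 (2 ^ i - 1) 0 (by omega) h1
        simp only [Nat.add_zero, Nat.or_zero, Nat.one_mul] at h3
        have hq1 : q ||| 1 = q + 1 := by
          conv_lhs => rw [show q = 2 * (q / 2) from by omega]
          rw [lor_odd]
          omega
        rw [h3, hq1, add_mul]
        omega
      have hinv : q * 2 ^ i + (2 ^ i - 1) + 2 ^ i =
          (a / 2 ^ (i + 1)) * 2 ^ (i + 1) + (2 ^ (i + 1) - 1) := by
        rw [hm]; omega
      rw [nl2, dif_pos hil]
      dsimp only
      rw [if_pos (⟨by rw [hand, hq2]; ring, hb⟩ : (a &&& 2 ^ i = 0 ∧ 0 < b))]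
      dsimp only
      by_cases hb1 : b = 1
      · subst hb1
        rw [if_pos (show (1 : Int) - 1 = 0 from by norm_num)]
        dsimp only
        simp only [nf]
        rw [if_pos (show (0 : Int) < 1 from by norm_num), if_pos (by rw [htest, hq2])]
        rw [nf_nonpos _ _ _ _ (by norm_num)]
      · rw [if_neg (show ¬ b - 1 = 0 from by omega)]
        simp only [nf]
        rw [if_pos hb, if_pos (by rw [htest, hq2])]
        rw [hor, hinv]
        exact ih (i + 1) (b - 1) fuel' (by omega) (by omega) (by omega)
    · -- a's bit i is 1: both sides skip it
      rw [hq2] at hp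
      have hinv : q * 2 ^ i + (2 ^ i - 1) =
          (a / 2 ^ (i + 1)) * 2 ^ (i + 1) + (2 ^ (i + 1) - 1) := by
        rw [hm]; omega
      rw [nl2, dif_pos hil]
      dsimp only
      rw [if_neg (show ¬ (a &&& 2 ^ i = 0 ∧ 0 < b) from by
        rw [hand, hq2]; intro hcc; omega)]
      dsimp only
      rw [if_neg (show ¬ b = 0 from by omega)]
      simp only [nf]
      rw [if_pos hb, if_neg (by rw [htest, hq2]; norm_num)]
      rw [hinv]
      exact ih (i + 1) b fuel' (by omega) hb (by omega)

theorem nl2_nonpos (a l : Nat) : ∀ (k i : Nat) (ans : Nat) (b : Int), i + k = l → b < 0 →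
    nl2 a l i ans b = (none, ans, b) := by
  intro k
  induction k with
  | zero =>
    intro i ans b hk hb
    rw [nl2]
    simp [show ¬ i < l from by omega]
  | succ k ih =>
    intro i ans b hk hb
    rw [nl2]
    simp [show i < l from by omega, hb.ne, show ¬(0:Int) < b from by omega]
    exact ih (i + 1) ans b (by omega) hb

-- bridges between the Int ports and the Nat mirrors
theorem bitCount_pc (a : Nat) : PySem.Int.bitCount (a : Int) = pc a := by
  induction a using Nat.strong_induction_on with
  | _ a ih =>
    rcases Nat.eq_zero_or_pos a with rfl | ha
    · simpa [pc] using PySem.Int.bitCount_natCast_zero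
    · rw [PySem.Int.bitCount_natCast ha, ih (a / 2) (Nat.div_lt_self ha one_lt_two), pc_eq' a]

-- cast helpers shared by the bridges
theorem cast_mask (j : Nat) : (1 : Int) <<< j = ((2 ^ j : Nat) : Int) := by
  rw [Int.shiftLeft_eq]; push_cast; ring

theorem cast_band (a j : Nat) :
    PySem.Int.band (a : Int) ((1 : Int) <<< j) = ((a &&& 2 ^ j : Nat) : Int) := by
  rw [cast_mask, PySem.Int.band_natCast]

theorem cast_bor (n j : Nat) :
    PySem.Int.bor (n : Int) ((1 : Int) <<< j) = ((n ||| 2 ^ j : Nat) : Int) := by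
  rw [cast_mask, PySem.Int.bor_natCast]

theorem cast_bor_one (n : Nat) : PySem.Int.bor (n : Int) 1 = ((n ||| 1 : Nat) : Int) := by
  rw [show (1 : Int) = ((1 : Nat) : Int) from rfl, PySem.Int.bor_natCast]

theorem cond_ne_iff (a j : Nat) (b : Int) :
    (PySem.Int.band (a : Int) ((1 : Int) <<< j) ≠ 0 ∧ 0 < b) ↔ (a &&& 2 ^ j ≠ 0 ∧ 0 < b) := by
  rw [cast_band]
  simp

theorem cond_eq_iff (a j : Nat) (b : Int) :
    (PySem.Int.band (a : Int) ((1 : Int) <<< j) = 0 ∧ 0 < b) ↔ (a &&& 2 ^ j = 0 ∧ 0 < b) := by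
  rw [cast_band]
  simp

theorem solveLoop1_bridge (a : Nat) : ∀ (i n : Nat) (b : Int),
    solveLoop1 (a : Int) i (n : Int) b =
      ((nl1 a i n b).1.map (fun v => (v : Int)), ((nl1 a i n b).2.1 : Int), (nl1 a i n b).2.2) := by
  intro i
  induction i with
  | zero =>
    intro n b
    simp only [solveLoop1, nl1]
    by_cases hc : a &&& 2 ^ 0 ≠ 0 ∧ 0 < b
    · rw [if_pos ((cond_ne_iff a 0 b).mpr hc), if_pos hc]
      dsimp only
      by_cases hb0 : b - 1 = 0 <;> simp [hb0, cast_bor, cast_bor_one]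
    · rw [if_neg (fun hcc => hc ((cond_ne_iff a 0 b).mp hcc)), if_neg hc]
      dsimp only
      by_cases hb0 : b = 0 <;> simp [hb0]
  | succ i ih =>
    intro n b
    simp only [solveLoop1, nl1]
    by_cases hc : a &&& 2 ^ (i + 1) ≠ 0 ∧ 0 < b
    · rw [if_pos ((cond_ne_iff a (i + 1) b).mpr hc), if_pos hc]
      dsimp only
      by_cases hb0 : b - 1 = 0
      · simp [hb0, cast_bor, cast_bor_one]
      · simp only [hb0, if_false]
        rw [cast_bor]
        exact ih (n ||| 2 ^ (i + 1)) (b - 1)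
    · rw [if_neg (fun hcc => hc ((cond_ne_iff a (i + 1) b).mp hcc)), if_neg hc]
      dsimp only
      by_cases hb0 : b = 0
      · simp [hb0]
      · simp only [hb0, if_false]
        exact ih n b

theorem solveLoop2_bridge (a l : Nat) : ∀ (k i n : Nat) (b : Int), i + k = l →
    solveLoop2 (a : Int) l i (n : Int) b =
      ((nl2 a l i n b).1.map (fun v => (v : Int)), ((nl2 a l i n b).2.1 : Int), (nl2 a l i n b).2.2) := by
  intro k
  induction k with
  | zero =>
    intro i n b hk
    rw [solveLoop2, nl2, dif_neg (by omega : ¬ i < l), dif_neg (by omega : ¬ i < l)]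
    simp
  | succ k ih =>
    intro i n b hk
    rw [solveLoop2, nl2, dif_pos (by omega : i < l), dif_pos (by omega : i < l)]
    dsimp only
    by_cases hc : a &&& 2 ^ i = 0 ∧ 0 < b
    · rw [if_pos ((cond_eq_iff a i b).mpr hc), if_pos hc]
      dsimp only
      by_cases hb0 : b - 1 = 0
      · simp [hb0, cast_bor, cast_bor_one]
      · simp only [hb0, if_false]
        rw [cast_bor]
        exact ih (i + 1) (n ||| 2 ^ i) (b - 1) (by omega)
    · rw [if_neg (fun hcc => hc ((cond_eq_iff a i b).mp hcc)), if_neg hc]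
      dsimp only
      by_cases hb0 : b = 0
      · simp [hb0]
      · simp only [hb0, if_false]
        exact ih (i + 1) n b (by omega)

theorem solveLoop3_bridge_aux : ∀ (K : Nat) (n : Nat) (b : Int), b.toNat = K →
    solveLoop3 (n : Int) b = (nl3 n b : Int) := by
  intro K
  induction K with
  | zero =>
    intro n b hK
    rw [solveLoop3, nl3, if_neg (by omega : ¬ (0 : Int) < b), if_neg (by omega : ¬ (0 : Int) < b)]
  | succ K ih =>
    intro n b hK
    have hb : 0 < b := by omega
    rw [solveLoop3, nl3, if_pos hb, if_pos hb]
    have hsh : ((n : Int) <<< (1 : Nat)) = ((2 * n : Nat) : Int) := by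
      rw [Int.shiftLeft_eq]; push_cast; ring
    have hb1 : PySem.Int.bor ((n : Int) <<< (1 : Nat)) 1 = ((2 * n + 1 : Nat) : Int) := by
      rw [hsh, show (1 : Int) = ((1 : Nat) : Int) from rfl, PySem.Int.bor_natCast, lor_odd]
    rw [hb1]
    exact ih (2 * n + 1) (b - 1) (by omega)

theorem solveAltClear_bridge : ∀ (k a : Nat), solveAltClear (a : Int) k = (clr a k : Int) := by
  intro k
  induction k with
  | zero => intro a; rfl
  | succ k ih =>
    intro a
    have hstep : PySem.Int.band (a : Int) ((a : Int) - 1) = ((a &&& (a - 1) : Nat) : Int) := by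
      rcases Nat.eq_zero_or_pos a with rfl | ha
      · show PySem.Int.band 0 (0 - 1) = _
        rw [show ((0 : Int) - 1) = -1 from by norm_num, PySem.Int.band_neg_one]
        simp
      · rw [show ((a : Int) - 1) = ((a - 1 : Nat) : Int) from by push_cast [ha]; ring,
          PySem.Int.band_natCast]
    show solveAltClear (PySem.Int.band (a : Int) ((a : Int) - 1)) k = ((clr (a &&& (a - 1)) k : Nat) : Int)
    rw [hstep]
    exact ih (a &&& (a - 1))

theorem solveAltFill_bridge : ∀ (fuel : Nat) (n : Nat) (rem : Int) (bit : Nat),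
    solveAltFill (n : Int) rem bit fuel = (nf n rem bit fuel : Int) := by
  intro fuel
  induction fuel with
  | zero => intro n rem bit; rfl
  | succ fuel ih =>
    intro n rem bit
    simp only [solveAltFill, nf]
    by_cases hr : 0 < rem
    · rw [if_pos hr, if_pos hr]
      have hsr : ((n : Int) >>> bit) = ((n >>> bit : Nat) : Int) := (Int.natCast_shiftRight n bit).symm
      have htest : PySem.Int.band ((n : Int) >>> bit) 1 = (((n >>> bit) &&& 1 : Nat) : Int) := by
        rw [hsr, show (1 : Int) = ((1 : Nat) : Int) from rfl, PySem.Int.band_natCast]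
      by_cases hz : (n >>> bit) &&& 1 = 0
      · rw [if_pos (by rw [htest, hz]; simp), if_pos hz, cast_bor]
        exact ih (n ||| 2 ^ bit) (rem - 1) (bit + 1)
      · rw [if_neg (by rw [htest]; exact_mod_cast hz), if_neg hz]
        exact ih n rem (bit + 1)
    · rw [if_neg hr, if_neg hr]

theorem solveLoop3_bridge (n : Nat) (b : Int) : solveLoop3 (n : Int) b = (nl3 n b : Int) :=
  solveLoop3_bridge_aux b.toNat n b rfl

-- the loops do nothing on a non-positive budget, for ANY Int A (also negative)
theorem solveLoop1_nonpos (A : Int) : ∀ (i : Nat) (ans b : Int), b < 0 →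
    solveLoop1 A i ans b = (none, ans, b) := by
  intro i
  induction i with
  | zero =>
    intro ans b hb
    simp [solveLoop1, hb.ne, show ¬(0:Int) < b from by omega]
  | succ i ih =>
    intro ans b hb
    simp [solveLoop1, hb.ne, show ¬(0:Int) < b from by omega]
    exact ih ans b hb

theorem solveLoop1_zero_b (A : Int) (i : Nat) (ans : Int) :
    solveLoop1 A i ans 0 = (some ans, ans, 0) := by
  cases i <;> simp [solveLoop1]

theorem solveLoop2_nonpos (A : Int) (l : Nat) : ∀ (k i : Nat) (ans b : Int), i + k = l → b < 0 →
    solveLoop2 A l i ans b = (none, ans, b) := by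
  intro k
  induction k with
  | zero =>
    intro i ans b hk hb
    rw [solveLoop2]
    simp [show ¬ i < l from by omega]
  | succ k ih =>
    intro i ans b hk hb
    rw [solveLoop2]
    simp [show i < l from by omega, hb.ne, show ¬(0:Int) < b from by omega]
    exact ih (i + 1) ans b (by omega) hb

theorem solveLoop3_nonpos (ans b : Int) (hb : ¬ 0 < b) : solveLoop3 ans b = ans := by
  rw [solveLoop3, if_neg hb]

-- A = B = 0 on a non-positive budget, for any Int A
theorem solve_eq_alt_nonpos (A B : Int) (hB : B ≤ 0) : solve A B = solve_alt A B := by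
  have halt0 : solve_alt A B = 0 := by
    show (if B ≤ 0 then 0 else _) = 0
    rw [if_pos hB]
  have hsolve : solve A B =
      (match solveLoop1 A (solveBinLen A).toNat 0 B with
       | (some r, _, _) => r
       | (none, ans1, B1) =>
         match solveLoop2 A (solveBinLen A).toNat 0 ans1 B1 with
         | (some r, _, _) => r
         | (none, ans2, B2) => solveLoop3 ans2 B2) := rfl
  rw [hsolve, halt0]
  rcases hB.lt_or_eq with hneg | h0
  case inr =>
    subst h0
    rw [solveLoop1_zero_b A _ 0]
  case inl =>
    rw [solveLoop1_nonpos A _ 0 B hneg]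
    dsimp only
    rw [solveLoop2_nonpos A _ (solveBinLen A).toNat 0 0 B (by omega) hneg]
    dsimp only
    exact solveLoop3_nonpos 0 B (by omega)

theorem nl1_zero_b (a : Nat) (i ans : Nat) : nl1 a i ans 0 = (some ans, ans, 0) := by
  cases i <;> simp [nl1]

theorem solve_eq_alt (a : Nat) (B : Int) : solve (a : Int) B = solve_alt (a : Int) B := by
  have hbc : PySem.Int.bitCount (a : Int) = pc a := bitCount_pc a
  set lN : Nat := if a = 0 then 1 else PySem.Int.bitLength (a : Int) with hlN
  have hbl1 : 1 ≤ PySem.Int.bitLength (a : Int) ∨ a = 0 := by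
    rcases eq_or_ne a 0 with h | h
    · exact Or.inr h
    · left
      have h2 := PySem.Int.lt_two_pow_bitLength (a : Int)
      simp only [Int.natAbs_natCast] at h2
      rcases Nat.eq_zero_or_pos (PySem.Int.bitLength (a : Int)) with h0 | h0
      · rw [h0] at h2; simp at h2; omega
      · omega
  have hlpos : 1 ≤ lN := by
    rcases eq_or_ne a 0 with h | h
    · simp [hlN, h]
    · rw [hlN, if_neg h]; omega
  have halt : a < 2 ^ lN := by
    rcases eq_or_ne a 0 with h | h
    · rw [hlN, if_pos h, h]; norm_num
    · have h2 := PySem.Int.lt_two_pow_bitLength (a : Int)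
      simp only [Int.natAbs_natCast] at h2
      rw [hlN, if_neg h]
      exact h2
  have hlle : lN ≤ PySem.Int.bitLength (a : Int) + 1 := by
    rcases eq_or_ne a 0 with h | h
    · rw [hlN, if_pos h]; omega
    · rw [hlN, if_neg h]; omega
  have hbin : solveBinLen (a : Int) = (lN : Int) := by
    simp only [solveBinLen]
    rw [if_neg (not_lt.mpr (Int.natCast_nonneg a))]
    rcases eq_or_ne a 0 with h | h
    · rw [if_pos (by exact_mod_cast h), hlN, if_pos h]
      norm_num
    · rw [if_neg (by exact_mod_cast h), hlN, if_neg h]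
      push_cast; ring
  have htn : (solveBinLen (a : Int)).toNat = lN := by rw [hbin]; simp
  have hsolve : solve (a : Int) B =
      (match solveLoop1 (a : Int) lN (((0 : Nat) : Int)) B with
       | (some r, _, _) => r
       | (none, ans1, B1) =>
         match solveLoop2 (a : Int) lN 0 ans1 B1 with
         | (some r, _, _) => r
         | (none, ans2, B2) => solveLoop3 ans2 B2) := by
    show (match solveLoop1 (a : Int) (solveBinLen (a : Int)).toNat 0 B with
       | (some r, _, _) => r
       | (none, ans1, B1) =>
         match solveLoop2 (a : Int) (solveBinLen (a : Int)).toNat 0 ans1 B1 with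
         | (some r, _, _) => r
         | (none, ans2, B2) => solveLoop3 ans2 B2) = _
    rw [htn]
    norm_num
  have haltdef : solve_alt (a : Int) B =
      (if B ≤ 0 then 0 else
       if B ≤ ((pc a : Nat) : Int) then solveAltClear (a : Int) (((pc a : Nat) : Int) - B).toNat
       else solveAltFill (a : Int) (B - ((pc a : Nat) : Int)) 0
         ((B - ((pc a : Nat) : Int)).toNat + PySem.Int.bitLength (a : Int) + 1)) := by
    show (if B ≤ 0 then 0 else
        if B ≤ ((PySem.Int.bitCount (a : Int) : Nat) : Int) then
        solveAltClear (a : Int) (((PySem.Int.bitCount (a : Int) : Nat) : Int) - B).toNat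
       else solveAltFill (a : Int) (B - (PySem.Int.bitCount (a : Int) : Int)) 0
         ((B - ((PySem.Int.bitCount (a : Int) : Nat) : Int)).toNat +
           PySem.Int.bitLength (a : Int) + 1)) = _
    rw [hbc]
  rw [hsolve, haltdef]
  rcases lt_trichotomy B 0 with hB | hB | hB
  · -- B < 0: A returns 0, B clears everything
    rw [solveLoop1_bridge a lN 0 B, nl1_nonpos a lN 0 B hB]
    dsimp only [Bind.bind, Option.bind, Option.map]
    rw [show ((0 : Nat) : Int) = (((0 : Nat) : Nat) : Int) from rfl,
      solveLoop2_bridge a lN lN 0 0 B (by omega), nl2_nonpos a lN lN 0 0 B (by omega) hB]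
    dsimp only [Bind.bind, Option.bind, Option.map]
    rw [solveLoop3_bridge 0 B, nl3, if_neg (by omega : ¬ (0 : Int) < B)]
    rw [if_pos (by omega : B ≤ (0 : Int))]
    norm_num
  · -- B = 0: A returns 0 immediately, B clears everything
    subst hB
    rw [solveLoop1_bridge a lN 0 0, nl1_zero_b a lN 0]
    dsimp only [Bind.bind, Option.bind, Option.map]
    rw [if_pos (le_refl (0 : Int))]
    norm_num
  · -- 0 < B
    have hmod : a % 2 ^ (lN + 1) = a :=
      Nat.mod_eq_of_lt (lt_of_lt_of_le halt (Nat.pow_le_pow_right (by norm_num) (by omega)))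
    rw [solveLoop1_bridge a lN 0 B, nl1_spec a lN 0 B hB (dvd_zero _), hmod,
      if_neg (by omega : ¬ B ≤ (0 : Int))]
    by_cases hle : B ≤ ((pc a : Nat) : Int)
    · rw [if_pos hle]
      dsimp only [Bind.bind, Option.bind, Option.map]
      rw [if_pos hle, solveAltClear_bridge,
        show (((pc a : Nat) : Int) - B).toNat = pc a - B.toNat from by omega]
      norm_num
    · rw [if_neg hle]
      dsimp only [Bind.bind, Option.bind, Option.map]
      rw [if_neg hle]
      simp only [Nat.zero_add]
      have hb'pos : 0 < B - ((pc a : Nat) : Int) := by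
        push_cast at hle ⊢; omega
      rw [solveLoop2_bridge a lN lN 0 a (B - ((pc a : Nat) : Int)) (by omega)]
      rcases hnl2 : nl2 a lN 0 a (B - ((pc a : Nat) : Int)) with ⟨o, ans2, b2⟩
      have hsim := sim2 a lN halt lN 0 (B - ((pc a : Nat) : Int))
        ((B - ((pc a : Nat) : Int)).toNat + PySem.Int.bitLength (a : Int) + 1)
        (by omega) hb'pos (by omega)
      rw [show (a / 2 ^ 0) * 2 ^ 0 + (2 ^ 0 - 1) = a from by simp] at hsim
      rw [hnl2] at hsim
      rw [solveAltFill_bridge, ← hsim]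
      cases o with
      | some v => simp
      | none =>
        dsimp only [Bind.bind, Option.bind, Option.map]
        rw [solveLoop3_bridge ans2 b2]

-- ===== VERDICT (by name: the statement is the Claim_ definition above) =====
theorem solve_spec : Claim_equal_solve := by
  intro A B _ hpre
  show solve A B = solve_alt A B
  by_cases hA0 : 0 ≤ A
  · have hA : A = ((A.toNat : Nat) : Int) := (Int.toNat_of_nonneg hA0).symm
    rw [hA]
    exact solve_eq_alt A.toNat B
  · have hB : B ≤ 0 := by
      rcases hpre with h | h
      · exact absurd h hA0
      · exact h
    exact solve_eq_alt_nonpos A B hB
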